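-- pv_equiv track=rewrite | github.com/OliverSchiffmann/QAOAstudygit | costAndValidityLandscape.py | check_tsp_validity
-- ===== SOURCE A (Python) =====
-- def check_tsp_validity(bitstring, cities, qubits):
--     """
--     Checks if a bitstring represents a valid TSP tour based on the 3x3 encoding.
--
--     A valid tour must satisfy two constraints simultaneously:
--     1. Each city is visited exactly once.
--     2. Exactly one city is visited at each time step.
--
--     Args:
--         bitstring (str): The bitstring solution.
--         cities (int): The number of cities (e.g., 4).
--         qubits (int): The total number of qubits (e.g., 9).
--
--     Returns:
--         bool: True if the bitstring represents a valid tour, False otherwise.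
--     """
--     citiesToVisit = cities - 1
--     # This set will store the positions (columns) where a '1' has been found.
--     foundPositions = set()
--
--     if len(bitstring) != qubits:
--         return False
--
--     for i in range(citiesToVisit):
--         # Calculate the start and end index for the current chunk
--         start = i * citiesToVisit
--         end = start + citiesToVisit
--         chunk = bitstring[start:end]
--
--         # Constraint 1: Check that exactly one city is visited at this time step (chunk)
--         if chunk.count("1") != 1:
--             return False
--
--         # Constraint 2: Check that each city is visited only once (via position)
--         position = chunk.find("1")
--         if position in foundPositions:
--             return False
--
--         foundPositions.add(position)
--     return True
-- ===== SOURCE B (Python) =====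
-- def check_tsp_validity(bitstring, cities, qubits):
--     if len(bitstring) != qubits:
--         return False
--     w = cities - 1
--     rows = [bitstring[i * w : (i + 1) * w] for i in range(w)]
--     if any(r.count("1") != 1 for r in rows):
--         return False
--     return all(sum(1 for r in rows if j < len(r) and r[j] == "1") == 1 for j in range(w))
-- ===== Notes on version B (the rewrite author's own statement) =====
-- stated objective: alternative
-- what changed: Replaces A's incremental found-positions set with a two-pass row/column formulation: build all row chunks, check each has exactly one '1', then check every column's '1'-count across the rows is exactly one.
import Mathlib
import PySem

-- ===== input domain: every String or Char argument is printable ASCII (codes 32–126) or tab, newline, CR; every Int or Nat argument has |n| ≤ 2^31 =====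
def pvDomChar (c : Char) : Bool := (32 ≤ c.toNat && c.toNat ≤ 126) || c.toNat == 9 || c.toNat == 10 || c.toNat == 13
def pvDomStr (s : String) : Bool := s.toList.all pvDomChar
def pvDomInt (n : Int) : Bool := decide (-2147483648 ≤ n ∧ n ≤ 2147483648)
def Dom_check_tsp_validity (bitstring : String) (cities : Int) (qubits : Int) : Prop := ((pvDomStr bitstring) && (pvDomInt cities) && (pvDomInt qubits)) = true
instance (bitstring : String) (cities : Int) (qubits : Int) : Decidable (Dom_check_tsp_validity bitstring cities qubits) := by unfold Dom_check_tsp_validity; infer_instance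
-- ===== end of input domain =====

-- B replaces A's incremental found-positions set with a two-pass row/column check
-- (every row chunk has exactly one '1', then every column's '1'-count is exactly one); alternative decomposition, same cost.

-- ===== PORT A =====
-- the for-loop of A: state = the set foundPositions; an early 'return False' = result false
def tspLoopA (cs : List Char) (w : Int) : List Int → PySem.Set Int → Bool
  | [], _found => true
  | i :: rest, found =>
      let start := i * w
      let stop := start + w
      let chunk := PySem.List.slice cs (some start) (some stop)
      if PySem.Chars.count chunk ['1'] ≠ 1 then false
      else
        let position := PySem.Chars.find chunk ['1']
        if PySem.Set.contains found position then false
        else tspLoopA cs w rest (PySem.Set.add found position)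

def check_tsp_validity (bitstring : String) (cities : Int) (qubits : Int) : Bool :=
  let citiesToVisit := cities - 1
  if ((PySem.Str.len bitstring : Int) ≠ qubits) then false
  else tspLoopA bitstring.toList citiesToVisit (PySem.List.pyRange 0 citiesToVisit 1) PySem.Set.empty

-- ===== PORT B =====
def check_tsp_validity_alt (bitstring : String) (cities : Int) (qubits : Int) : Bool :=
  if ((PySem.Str.len bitstring : Int) ≠ qubits) then false
  else
    let w := cities - 1
    let rows := (PySem.List.pyRange 0 w 1).map
      (fun i => PySem.List.slice bitstring.toList (some (i * w)) (some ((i + 1) * w)))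
    if rows.any (fun r => PySem.Chars.count r ['1'] ≠ 1) then false
    else (PySem.List.pyRange 0 w 1).all (fun j =>
      rows.countP (fun r => decide (j < (r.length : Int)) && (PySem.List.pyGet? r j == some '1')) == 1)

-- ===== PRECONDITION & SPEC =====
def Spec_check_tsp_validity (bitstring : String) (cities : Int) (qubits : Int) (out : Bool) : Prop := out = check_tsp_validity_alt bitstring cities qubits
instance (bitstring : String) (cities : Int) (qubits : Int) (out : Bool) : Decidable (Spec_check_tsp_validity bitstring cities qubits out) := by unfold Spec_check_tsp_validity; infer_instance

-- ===== CLAIM (what is proved, stated in full; the proofs are below) =====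
def Claim_equal_check_tsp_validity : Prop := ∀ (bitstring : String) (cities : Int) (qubits : Int), Dom_check_tsp_validity bitstring cities qubits → Spec_check_tsp_validity bitstring cities qubits (check_tsp_validity bitstring cities qubits)

-- ===== LEMMAS AND PROOFS =====

-- chunk i and its '1'-position, as A computes them
def pvChunk (cs : List Char) (w i : Int) : List Char :=
  PySem.List.slice cs (some (i * w)) (some (i * w + w))

def pvPos (cs : List Char) (w i : Int) : Int :=
  PySem.Chars.find (pvChunk cs w i) ['1']

-- Python's substring count for a single-character needle is the character count
lemma chars_count_go_singleton (c : Char) :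
    ∀ (fuel : Nat) (l : List Char) (acc : Nat), l.length ≤ fuel →
      PySem.Chars.count.go [c] fuel l acc = acc + l.count c := by
  intro fuel
  induction fuel with
  | zero =>
      intro l acc h
      have : l = [] := List.eq_nil_of_length_eq_zero (Nat.le_zero.mp h)
      subst this; simp [PySem.Chars.count.go]
  | succ n ih =>
      intro l acc h
      cases l with
      | nil => simp [PySem.Chars.count.go]
      | cons x t =>
          have ht : t.length ≤ n := by simpa using h
          by_cases hx : c = x
          · subst hx
            simp [PySem.Chars.count.go, List.isPrefixOf, ih t (acc + 1) ht]
            omega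
          · simp [PySem.Chars.count.go, List.isPrefixOf, hx, ih t acc ht, Ne.symm hx]

lemma chars_count_singleton (c : Char) (l : List Char) :
    PySem.Chars.count l [c] = l.count c := by
  have := chars_count_go_singleton c l.length l 0 le_rfl
  simpa [PySem.Chars.count] using this

-- two distinct positions carrying the same value force count ≥ 2
lemma count_ge_two_of_two_indices {α : Type} [DecidableEq α] (l : List α) (a : α)
    (i j : Nat) (hij : i < j)
    (ha : l[i]? = some a) (hb : l[j]? = some a) : 2 ≤ l.count a := by
  have hd : (l.drop i)[0]? = some a := by simpa using ha
  obtain ⟨rest, hrest⟩ : ∃ rest, l.drop i = a :: rest := by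
    cases hdi : l.drop i with
    | nil => rw [hdi] at hd; simp at hd
    | cons y ys =>
        rw [hdi] at hd; simp at hd
        exact ⟨ys, by rw [hd]⟩
  have hj' : (l.drop i)[j - i]? = some a := by
    rw [List.getElem?_drop]
    have : i + (j - i) = j := by omega
    rw [this]; exact hb
  have hmem : a ∈ rest := by
    rw [hrest] at hj'
    cases hji : j - i with
    | zero => omega
    | succ m =>
        rw [hji] at hj'
        simp at hj'
        exact List.mem_of_getElem? hj'
  have h2 : 2 ≤ (l.drop i).count a := by
    rw [hrest, List.count_cons]
    have := List.count_pos_iff.mpr hmem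
    simp
    omega
  have h3 : (l.drop i).count a ≤ l.count a := (List.drop_sublist i l).count_le a
  omega

lemma singleton_prefix_iff {α : Type} (a : α) (l : List α) :
    [a] <+: l ↔ l[0]? = some a := by
  cases l with
  | nil => simp
  | cons x t => simp [List.cons_prefix_cons, eq_comm]

-- with exactly one '1' in r, find points at the unique '1'
lemma find_one_spec (r : List Char) (h : r.count '1' = 1) :
    ∃ k : Nat, PySem.Chars.find r ['1'] = (k : Int) ∧ k < r.length ∧
      r[k]? = some '1' ∧ ∀ m : Nat, r[m]? = some '1' → m = k := by
  have hmem : '1' ∈ r := List.count_pos_iff.mp (by omega)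
  have hinf : ['1'] <:+: r := by
    rcases List.append_of_mem hmem with ⟨s, t, rfl⟩
    exact ⟨s, t, by simp⟩
  have hge : 0 ≤ PySem.Chars.find r ['1'] := (PySem.Chars.find_nonneg_iff _ _).mpr hinf
  obtain ⟨hpre, _hmin⟩ := PySem.Chars.find_spec (s := r) (sub := ['1']) hge
  set k := (PySem.Chars.find r ['1']).toNat with hk
  have hget : r[k]? = some '1' := by
    have := (singleton_prefix_iff '1' (r.drop k)).mp hpre
    simpa [List.getElem?_drop] using this
  refine ⟨k, by omega, (List.getElem?_eq_some_iff.mp hget).1, hget, ?_⟩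
  intro m hm
  by_contra hne
  rcases Nat.lt_or_ge m k with hlt | hge'
  · exact absurd (count_ge_two_of_two_indices r '1' m k hlt hm hget) (by omega)
  · have hlt' : k < m := by omega
    exact absurd (count_ge_two_of_two_indices r '1' k m hlt' hget hm) (by omega)

-- B's column predicate holds for a one-'1' row exactly when find lands on that column
lemma pred_iff_find_eq (r : List Char) (h : PySem.Chars.count r ['1'] = 1)
    (j : Int) (hj : 0 ≤ j) :
    ((decide (j < (r.length : Int)) && (PySem.List.pyGet? r j == some '1')) = true)
      ↔ PySem.Chars.find r ['1'] = j := by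
  rw [chars_count_singleton] at h
  obtain ⟨k, hfind, hk, hget, huniq⟩ := find_one_spec r h
  obtain ⟨n, rfl⟩ := Int.eq_ofNat_of_zero_le hj
  rw [PySem.List.pyGet?_natCast]
  constructor
  · intro hp
    simp only [Bool.and_eq_true, decide_eq_true_eq, beq_iff_eq] at hp
    have hnk := huniq n hp.2
    rw [hnk]; exact hfind
  · intro he
    have hnk : (n : Int) = (k : Int) := by rw [← he, hfind]
    have : n = k := by omega
    subst this
    simp only [Bool.and_eq_true, decide_eq_true_eq, beq_iff_eq]
    exact ⟨by exact_mod_cast hk, hget⟩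

-- characterisation of A's loop
lemma tspLoopA_true_iff (cs : List Char) (w : Int) :
    ∀ (l : List Int) (found : PySem.Set Int),
      tspLoopA cs w l found = true ↔
        ((∀ i ∈ l, PySem.Chars.count (pvChunk cs w i) ['1'] = 1)
         ∧ (l.map (pvPos cs w)).Nodup
         ∧ ∀ i ∈ l, pvPos cs w i ∉ found) := by
  intro l
  induction l with
  | nil => intro found; simp [tspLoopA]
  | cons i rest ih =>
      intro found
      have hstep : tspLoopA cs w (i :: rest) found =
          (if PySem.Chars.count (pvChunk cs w i) ['1'] ≠ 1 then false
           else if PySem.Set.contains found (pvPos cs w i) then false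
           else tspLoopA cs w rest (PySem.Set.add found (pvPos cs w i))) := rfl
      rw [hstep]
      by_cases hc : PySem.Chars.count (pvChunk cs w i) ['1'] = 1
      · rw [if_neg (by simpa using hc)]
        by_cases hf : pvPos cs w i ∈ found
        · rw [if_pos ((PySem.Set.contains_iff _ _).mpr hf)]
          simp only [Bool.false_eq_true, false_iff]
          rintro ⟨_, _, hnin⟩
          exact hnin i (List.mem_cons_self) hf
        · rw [if_neg (by
            intro hcon
            exact hf ((PySem.Set.contains_iff _ _).mp hcon)), ih]
          simp only [List.mem_cons, List.map_cons, List.nodup_cons, List.mem_map,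
            PySem.Set.mem_add]
          constructor
          · rintro ⟨hcnt, hnd, hnin⟩
            refine ⟨?_, ⟨?_, hnd⟩, ?_⟩
            · rintro i' (rfl | hi')
              · exact hc
              · exact hcnt i' hi'
            · rintro ⟨j, hj, hej⟩
              exact (hnin j hj) (Or.inr hej)
            · rintro i' (rfl | hi')
              · exact hf
              · intro hmem; exact (hnin i' hi') (Or.inl hmem)
          · rintro ⟨hcnt, ⟨hnotin, hnd⟩, hnin⟩
            refine ⟨fun i' hi' => hcnt i' (Or.inr hi'), hnd, ?_⟩
            intro j hj
            rintro (hmem | heq)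
            · exact (hnin j (Or.inr hj)) hmem
            · exact hnotin ⟨j, hj, heq⟩
      · rw [if_pos (by simpa using hc)]
        simp only [Bool.false_eq_true, false_iff]
        rintro ⟨hcnt, _, _⟩
        exact hc (hcnt i (List.mem_cons_self))

-- pigeonhole: a list drawn from a nodup list R of the same length is nodup iff every
-- element of R occurs exactly once in it
lemma nodup_iff_counts {α : Type} [DecidableEq α] (R ps : List α) (hR : R.Nodup)
    (hlen : ps.length = R.length) (hsub : ∀ x ∈ ps, x ∈ R) :
    ps.Nodup ↔ ∀ j ∈ R, ps.count j = 1 := by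
  constructor
  · intro hnd j hj
    have hsp : ps.Subperm R := hnd.subperm hsub
    have hperm : ps.Perm R := hsp.perm_of_length_le (le_of_eq hlen.symm)
    rw [hperm.count_eq]
    exact List.count_eq_one_of_mem hR hj
  · intro hcnt
    rw [List.nodup_iff_count_le_one]
    intro a
    by_cases ha : a ∈ ps
    · exact le_of_eq (hcnt a (hsub a ha))
    · simp [List.count_eq_zero_of_not_mem ha]

-- each one-'1' chunk's position lies in [0, w)
lemma pos_mem_range (cs : List Char) (w i : Int) (hw : 0 < w) (hi : 0 ≤ i)
    (h : PySem.Chars.count (pvChunk cs w i) ['1'] = 1) :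
    pvPos cs w i ∈ PySem.List.pyRange 0 w 1 := by
  rw [chars_count_singleton] at h
  obtain ⟨k, hfind, hk, _, _⟩ := find_one_spec (pvChunk cs w i) h
  have h1 : 0 ≤ i * w := mul_nonneg hi hw.le
  have hlen : (pvChunk cs w i).length ≤ w.toNat := by
    unfold pvChunk
    rw [PySem.List.slice_toNat cs h1 (by omega)]
    have := List.length_take_le ((i * w + w).toNat - (i * w).toNat) (cs.drop (i * w).toNat)
    omega
  have hkw : k < w.toNat := lt_of_lt_of_le hk hlen
  rw [PySem.List.mem_pyRange_one]
  unfold pvPos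
  rw [hfind]
  omega

lemma count_map_eq_countP {α β : Type} [DecidableEq β] (f : α → β) (l : List α) (b : β) :
    (l.map f).count b = l.countP (fun a => f a == b) := by
  induction l with
  | nil => simp
  | cons x t ih => simp [List.count_cons, List.countP_cons, ih]

-- the two ports agree
lemma ports_agree (cs : List Char) (w : Int) :
    tspLoopA cs w (PySem.List.pyRange 0 w 1) PySem.Set.empty =
      (if (PySem.List.pyRange 0 w 1).map
            (fun i => PySem.List.slice cs (some (i * w)) (some ((i + 1) * w)))
          |>.any (fun r => PySem.Chars.count r ['1'] ≠ 1) then false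
       else (PySem.List.pyRange 0 w 1).all (fun j =>
        ((PySem.List.pyRange 0 w 1).map
            (fun i => PySem.List.slice cs (some (i * w)) (some ((i + 1) * w)))).countP
          (fun r => decide (j < (r.length : Int)) && (PySem.List.pyGet? r j == some '1')) == 1)) := by
  have hchunk : (fun i : Int => PySem.List.slice cs (some (i * w)) (some ((i + 1) * w)))
      = fun i => pvChunk cs w i := by
    funext i; rw [pvChunk, add_one_mul]
  rw [hchunk]
  rcases le_or_gt w 0 with hw | hw
  · rw [PySem.List.pyRange_one_eq_nil (by omega)]
    simp [tspLoopA]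
  · set R := PySem.List.pyRange 0 w 1 with hR
    by_cases hrows : ∀ i ∈ R, PySem.Chars.count (pvChunk cs w i) ['1'] = 1
    · have hany : (R.map (fun i => pvChunk cs w i)).any
          (fun r => PySem.Chars.count r ['1'] ≠ 1) = false := by
        simp only [List.any_map, List.any_eq_false, Function.comp]
        intro i hi
        simpa using hrows i hi
      simp only [hany, Bool.false_eq_true, if_false]
      -- both sides as propositions
      rw [Bool.eq_iff_iff, tspLoopA_true_iff]
      have hRnd : R.Nodup := PySem.List.nodup_pyRange_one 0 w
      have hcountP : ∀ j ∈ R, ((R.map (fun i => pvChunk cs w i)).countP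
          (fun r => decide (j < (r.length : Int)) && (PySem.List.pyGet? r j == some '1')))
            = (R.map (pvPos cs w)).count j := by
        intro j hj
        have hj0 : 0 ≤ j := ((PySem.List.mem_pyRange_one).mp hj).1
        rw [List.countP_map, count_map_eq_countP]
        apply List.countP_congr
        intro a ha
        have hiff := pred_iff_find_eq (pvChunk cs w a) (hrows a ha) j hj0
        simp only [Function.comp]
        rw [Bool.eq_iff_iff, beq_iff_eq]
        simpa [pvPos] using hiff
      have hsub : ∀ x ∈ R.map (pvPos cs w), x ∈ R := by
        intro x hx
        obtain ⟨a, ha, rfl⟩ := List.mem_map.mp hx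
        have h0a : 0 ≤ a := ((PySem.List.mem_pyRange_one).mp ha).1
        exact pos_mem_range cs w a hw h0a (hrows a ha)
      have hiff := nodup_iff_counts R (R.map (pvPos cs w)) hRnd (by simp) hsub
      constructor
      · rintro ⟨_, hnd, _⟩
        rw [List.all_eq_true]
        intro j hj
        rw [beq_iff_eq, hcountP j hj]
        exact (hiff.mp hnd) j hj
      · intro hall
        refine ⟨hrows, ?_, ?_⟩
        · apply hiff.mpr
          intro j hj
          have h := List.all_eq_true.mp hall j hj
          rw [beq_iff_eq, hcountP j hj] at h
          exact h
        · intro a _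
          simp [PySem.Set.empty]
    · push Not at hrows
      obtain ⟨i, hi, hci⟩ := hrows
      have hany : (R.map (fun i => pvChunk cs w i)).any
          (fun r => PySem.Chars.count r ['1'] ≠ 1) = true := by
        simp only [List.any_map, List.any_eq_true, Function.comp]
        exact ⟨i, hi, by simpa using hci⟩
      simp only [hany, if_true]
      have hne : ¬ (tspLoopA cs w R PySem.Set.empty = true) := by
        rw [tspLoopA_true_iff]
        rintro ⟨hcnt, _, _⟩
        exact hci (hcnt i hi)
      exact Bool.eq_false_iff.mpr hne

-- ===== VERDICT (by name: the statement is the Claim_ definition above) =====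
theorem check_tsp_validity_spec : Claim_equal_check_tsp_validity := by
  intro bitstring cities qubits _dom
  unfold Spec_check_tsp_validity check_tsp_validity check_tsp_validity_alt
  by_cases hlen : ((PySem.Str.len bitstring : Int) ≠ qubits)
  · simp only [if_pos hlen]
  · simp only [if_neg hlen]
    exact ports_agree bitstring.toList (cities - 1)
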